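-- pv_equiv track=rewrite | github.com/thesavant42/retrorecon | retrorecon/search_utils.py | parse_tag_expression
-- ===== SOURCE A (Python) =====
-- from typing import List, Tuple
--
-- def parse_tag_expression(tokens: List[str], pos: int = 0) -> Tuple[str, List[str], int]:
--     """Recursive descent parser returning SQL and params."""
--     def parse_or(p: int) -> Tuple[str, List[str], int]:
--         sql, params, p = parse_and(p)
--         while p < len(tokens):
--             t = tokens[p].upper()
--             if t == 'OR':
--                 p += 1
--                 rhs_sql, rhs_params, p = parse_and(p)
--                 sql = f"({sql} OR {rhs_sql})"
--                 params.extend(rhs_params)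
--             else:
--                 break
--         return sql, params, p
--
--     def parse_and(p: int) -> Tuple[str, List[str], int]:
--         sql, params, p = parse_not(p)
--         while p < len(tokens):
--             t = tokens[p].upper()
--             if t == 'AND':
--                 p += 1
--             elif t in ('OR', ')'):
--                 break
--             else:
--                 pass
--             rhs_sql, rhs_params, p = parse_not(p)
--             sql = f"({sql} AND {rhs_sql})"
--             params.extend(rhs_params)
--         return sql, params, p
--
--     def parse_not(p: int) -> Tuple[str, List[str], int]:
--         if p < len(tokens) and tokens[p].upper() == 'NOT':
--             p += 1
--             sql, params, p = parse_not(p)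
--             return f"(NOT {sql})", params, p
--         return parse_primary(p)
--
--     def parse_primary(p: int) -> Tuple[str, List[str], int]:
--         if p >= len(tokens):
--             raise ValueError('Unexpected end of expression')
--         tok = tokens[p]
--         if tok == '(':  # parse subexpression
--             sql, params, p = parse_or(p + 1)
--             if p >= len(tokens) or tokens[p] != ')':
--                 raise ValueError('Unmatched parenthesis')
--             return sql, params, p + 1
--         if tok == ')':
--             raise ValueError('Unexpected )')
--         return "has_tag(tags, ?)", [tok], p + 1
--
--     return parse_or(pos)
-- ===== SOURCE B (Python) =====
-- from typing import List, Tuple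
--
-- def parse_tag_expression(tokens: List[str], pos: int = 0) -> Tuple[str, List[str], int]:
--     """Shunting-yard parser: one left-to-right scan with an operand stack and an
--     operator stack instead of mutually recursive descent."""
--     PREC = {'OR': 1, 'AND': 2, 'NOT': 3}
--     operands = []  # stack of (sql, params)
--     ops = []       # stack of 'OR' | 'AND' | 'NOT' | '('
--
--     def apply_op(op):
--         if op == 'NOT':
--             sql, params = operands.pop()
--             operands.append((f"(NOT {sql})", params))
--         else:
--             rs, rp = operands.pop()
--             ls, lp = operands.pop()
--             lp.extend(rp)
--             operands.append((f"({ls} {op} {rs})", lp))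
--
--     def fold(prec):
--         while ops and ops[-1] != '(' and PREC[ops[-1]] >= prec:
--             apply_op(ops.pop())
--
--     n = len(tokens)
--     p = pos
--     expect = True  # expecting an operand
--     while p < n:
--         tok = tokens[p]
--         u = tok.upper()
--         if expect:
--             if u == 'NOT':
--                 ops.append('NOT')
--             elif tok == '(':
--                 ops.append('(')
--             elif tok == ')':
--                 raise ValueError('Unexpected )')
--             else:
--                 operands.append(("has_tag(tags, ?)", [tok]))
--                 expect = False
--         else:
--             if tok == ')':
--                 fold(1)
--                 if ops:          # top must be '('
--                     ops.pop()
--                 else: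
--                     break        # stray ')' at top level: stop scanning here
--             elif u == 'OR':
--                 fold(1)
--                 ops.append('OR')
--                 expect = True
--             elif u == 'AND':
--                 fold(2)
--                 ops.append('AND')
--                 expect = True
--             else:                # implicit AND: reprocess this token as operand
--                 fold(2)
--                 ops.append('AND')
--                 expect = True
--                 continue
--         p += 1
--     if expect:
--         raise ValueError('Unexpected end of expression')
--     fold(1)
--     if ops:
--         raise ValueError('Unmatched parenthesis')
--     sql, params = operands[-1]
--     return sql, params, p
-- ===== Notes on version B (the rewrite author's own statement) =====
-- stated objective: alternative
-- what changed: Replaced the four mutually recursive descent functions by a single left-to-right shunting-yard scan maintaining an operand stack and an operator stack with precedence folding (NOT>AND>OR), an implicit-AND reprocessing step, and a '('-marker for parentheses.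
import Mathlib
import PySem

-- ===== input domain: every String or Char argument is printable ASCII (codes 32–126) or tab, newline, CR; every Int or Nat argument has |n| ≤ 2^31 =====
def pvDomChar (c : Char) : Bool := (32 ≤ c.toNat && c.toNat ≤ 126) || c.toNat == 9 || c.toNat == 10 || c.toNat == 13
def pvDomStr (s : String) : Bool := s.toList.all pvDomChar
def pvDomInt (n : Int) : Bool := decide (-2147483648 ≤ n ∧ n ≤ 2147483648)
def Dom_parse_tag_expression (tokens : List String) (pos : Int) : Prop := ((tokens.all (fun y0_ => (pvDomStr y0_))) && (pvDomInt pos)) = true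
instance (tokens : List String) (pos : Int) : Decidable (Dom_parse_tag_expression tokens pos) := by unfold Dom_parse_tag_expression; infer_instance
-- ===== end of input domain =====

-- B replaces A's mutually recursive descent by a single shunting-yard scan with an
-- operand stack and a precedence-folded operator stack (objective: alternative algorithm).

-- ===== PORT A =====
-- Transliteration of A's four nested functions; `none` models a raised ValueError /
-- IndexError.  `fuel` is only a totality device (each call consumes one unit); the
-- initial fuel 4*((len-pos).toNat+2) is proved sufficient for every input Pre_ admits.
def pvUp (t : String) : String := PySem.Str.upper t

mutual
-- parse_primary
def pvGoPrim (tokens : List String) (fuel : Nat) (p : Int) : Option (String × List String × Int) :=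
  match fuel with
  | 0 => none
  | fuel + 1 =>
    if p ≥ (tokens.length : Int) then none        -- raise ValueError('Unexpected end of expression')
    else
      match PySem.List.pyGet? tokens p with
      | none => none                              -- IndexError (p < -len)
      | some tok =>
        if tok = "(" then
          match pvGoOr tokens fuel (p + 1) with
          | none => none
          | some (s, ps, p1) =>
            if p1 ≥ (tokens.length : Int) then none   -- raise ValueError('Unmatched parenthesis')
            else
              match PySem.List.pyGet? tokens p1 with
              | none => none
              | some t1 => if t1 = ")" then some (s, ps, p1 + 1) else none
        else if tok = ")" then none               -- raise ValueError('Unexpected )')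
        else some ("has_tag(tags, ?)", [tok], p + 1)

-- parse_not
def pvGoNot (tokens : List String) (fuel : Nat) (p : Int) : Option (String × List String × Int) :=
  match fuel with
  | 0 => none
  | fuel + 1 =>
    if p < (tokens.length : Int) then
      match PySem.List.pyGet? tokens p with
      | none => none                              -- IndexError
      | some t =>
        if pvUp t = "NOT" then
          match pvGoNot tokens fuel (p + 1) with
          | none => none
          | some (s, ps, p1) => some ("(NOT " ++ s ++ ")", ps, p1)
        else pvGoPrim tokens fuel p
    else pvGoPrim tokens fuel p

-- parse_and (entry + while loop)
def pvGoAnd (tokens : List String) (fuel : Nat) (p : Int) : Option (String × List String × Int) :=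
  match fuel with
  | 0 => none
  | fuel + 1 =>
    match pvGoNot tokens fuel p with
    | none => none
    | some (s, ps, p1) => pvGoAndLoop tokens fuel s ps p1

def pvGoAndLoop (tokens : List String) (fuel : Nat) (s : String) (ps : List String) (p : Int) :
    Option (String × List String × Int) :=
  match fuel with
  | 0 => none
  | fuel + 1 =>
    if p < (tokens.length : Int) then
      match PySem.List.pyGet? tokens p with
      | none => none                              -- IndexError on tokens[p].upper()
      | some t =>
        if pvUp t = "AND" then
          match pvGoNot tokens fuel (p + 1) with
          | none => none
          | some (rs, rps, p2) =>
            pvGoAndLoop tokens fuel ("(" ++ s ++ " AND " ++ rs ++ ")") (ps ++ rps) p2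
        else if pvUp t = "OR" ∨ pvUp t = ")" then some (s, ps, p)
        else
          match pvGoNot tokens fuel p with        -- implicit AND
          | none => none
          | some (rs, rps, p2) =>
            pvGoAndLoop tokens fuel ("(" ++ s ++ " AND " ++ rs ++ ")") (ps ++ rps) p2
    else some (s, ps, p)

-- parse_or (entry + while loop)
def pvGoOr (tokens : List String) (fuel : Nat) (p : Int) : Option (String × List String × Int) :=
  match fuel with
  | 0 => none
  | fuel + 1 =>
    match pvGoAnd tokens fuel p with
    | none => none
    | some (s, ps, p1) => pvGoOrLoop tokens fuel s ps p1

def pvGoOrLoop (tokens : List String) (fuel : Nat) (s : String) (ps : List String) (p : Int) :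
    Option (String × List String × Int) :=
  match fuel with
  | 0 => none
  | fuel + 1 =>
    if p < (tokens.length : Int) then
      match PySem.List.pyGet? tokens p with
      | none => none
      | some t =>
        if pvUp t = "OR" then
          match pvGoAnd tokens fuel (p + 1) with
          | none => none
          | some (rs, rps, p2) =>
            pvGoOrLoop tokens fuel ("(" ++ s ++ " OR " ++ rs ++ ")") (ps ++ rps) p2
        else some (s, ps, p)
    else some (s, ps, p)
end

def parse_tag_expression (tokens : List String) (pos : Int) : String × List String × Int :=
  (pvGoOr tokens (4 * (((tokens.length : Int) - pos).toNat + 2)) pos).getD ("", [], 0)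

-- ===== PORT B =====
-- Transliteration of Source B: shunting-yard with operand stack `S` and operator stack `O`.
def pvPrec (op : String) : Nat := if op = "OR" then 1 else if op = "AND" then 2 else 3

def pvApply (op : String) (S : List (String × List String)) : List (String × List String) :=
  if op = "NOT" then
    match S with
    | (s, ps) :: rest => ("(NOT " ++ s ++ ")", ps) :: rest
    | [] => []
  else
    match S with
    | (rs, rps) :: (ls, lps) :: rest => ("(" ++ ls ++ " " ++ op ++ " " ++ rs ++ ")", lps ++ rps) :: rest
    | _ => S

def pvFold (prec : Nat) (S : List (String × List String)) (O : List String) :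
    List (String × List String) × List String :=
  match O with
  | [] => (S, [])
  | op :: rest =>
    if op = "(" then (S, op :: rest)
    else if prec ≤ pvPrec op then pvFold prec (pvApply op S) rest
    else (S, op :: rest)

-- the code after Source B's while loop (`if ops: raise Unmatched; return operands[-1], p`);
-- `none` models a raised ValueError
def pvFinish (S : List (String × List String)) (O : List String) (p : Int) :
    Option (String × List String × Int) :=
  match pvFold 1 S O with
  | (_, _ :: _) => none                           -- raise ValueError('Unmatched parenthesis')
  | ((s, ps) :: _, []) => some (s, ps, p)
  | ([], []) => none                              -- operands[-1] on empty stack (unreachable)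

def pvRunB (tokens : List String) (p : Int) (expect : Bool) (S : List (String × List String))
    (O : List String) : Option (String × List String × Int) :=
  if _h : p < (tokens.length : Int) then
    match PySem.List.pyGet? tokens p with
    | none => none                                -- IndexError
    | some tok =>
      match expect with
      | true =>
        if pvUp tok = "NOT" then pvRunB tokens (p + 1) true S ("NOT" :: O)
        else if tok = "(" then pvRunB tokens (p + 1) true S ("(" :: O)
        else if tok = ")" then none               -- raise ValueError('Unexpected )')
        else pvRunB tokens (p + 1) false (("has_tag(tags, ?)", [tok]) :: S) O
      | false =>
        if tok = ")" then
          match pvFold 1 S O with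
          | (S1, _ :: rest) => pvRunB tokens (p + 1) false S1 rest
          | (S1, []) => pvFinish S1 [] p          -- stray ')' at top level: break
        else if pvUp tok = "OR" then
          pvRunB tokens (p + 1) true (pvFold 1 S O).1 ("OR" :: (pvFold 1 S O).2)
        else if pvUp tok = "AND" then
          pvRunB tokens (p + 1) true (pvFold 2 S O).1 ("AND" :: (pvFold 2 S O).2)
        else
          pvRunB tokens p true (pvFold 2 S O).1 ("AND" :: (pvFold 2 S O).2)  -- implicit AND: reprocess token
  else
    match expect with
    | true => none                                -- raise ValueError('Unexpected end of expression')
    | false => pvFinish S O p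
termination_by (2 * (((tokens.length : Int) - p).toNat) + (if expect then 0 else 1) : Nat)
decreasing_by all_goals (simp only [reduceIte]; omega)

def parse_tag_expression_alt (tokens : List String) (pos : Int) : String × List String × Int :=
  (pvRunB tokens pos true [] []).getD ("", [], 0)

-- ===== PRECONDITION & SPEC =====
-- An independent one-pass DFA check (expect-operand flag + parenthesis depth counter,
-- no output, no operator handling): true exactly on the inputs where Python A returns
-- normally; everywhere A raises (ValueError, or IndexError for pos < -len) it is false.
-- pvStream is the token stream Python sees from position pos (negative indices wrap).
def pvStream (tokens : List String) (pos : Int) : List String :=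
  if pos < (tokens.length : Int) then
    (if 0 ≤ pos then tokens.drop pos.toNat else tokens.drop (pos + tokens.length).toNat ++ tokens)
  else []

def pvScanL : List String → Bool → Nat → Bool
  | [], expect, d => !expect && d == 0
  | t :: rest, expect, d =>
    if expect then
      if pvUp t = "NOT" then pvScanL rest true d
      else if t = "(" then pvScanL rest true (d + 1)
      else if t = ")" then false
      else pvScanL rest false d
    else
      if t = ")" then (if d = 0 then true else pvScanL rest false (d - 1))
      else if pvUp t = "OR" ∨ pvUp t = "AND" then pvScanL rest true d
      else if pvUp t = "NOT" then pvScanL rest true d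
      else if t = "(" then pvScanL rest true (d + 1)
      else pvScanL rest false d

def Pre_parse_tag_expression (tokens : List String) (pos : Int) : Prop :=
  -(tokens.length : Int) ≤ pos ∧ pvScanL (pvStream tokens pos) true 0 = true
instance (tokens : List String) (pos : Int) : Decidable (Pre_parse_tag_expression tokens pos) := by
  unfold Pre_parse_tag_expression; infer_instance

def pvWitness_parse_tag_expression : List String × Int := (["(", "a", "OR", "not", "b", ")", "c"], 0)

def Spec_parse_tag_expression (tokens : List String) (pos : Int) (out : String × List String × Int) : Prop := out = parse_tag_expression_alt tokens pos
instance (tokens : List String) (pos : Int) (out : String × List String × Int) : Decidable (Spec_parse_tag_expression tokens pos out) := by unfold Spec_parse_tag_expression; infer_instance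

-- ===== CLAIM (what is proved, stated in full; the proofs are below) =====
def Claim_equal_parse_tag_expression : Prop := ∀ (tokens : List String) (pos : Int), Dom_parse_tag_expression tokens pos → Pre_parse_tag_expression tokens pos → Spec_parse_tag_expression tokens pos (parse_tag_expression tokens pos)

-- ===== LEMMAS AND PROOFS =====

-- ---- proof-only helper definitions ----

def pvWrapNot : Nat → String × List String → String × List String
  | 0, f => f
  | k + 1, f => ("(NOT " ++ (pvWrapNot k f).1 ++ ")", (pvWrapNot k f).2)

def pvBar1 (O : List String) : Prop := O = [] ∨ ∃ r, O = "(" :: r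
def pvBar2 (O : List String) : Prop := pvBar1 O ∨ ∃ r, O = "OR" :: r

def pvPostAnd (tokens : List String) (p : Int) : Prop :=
  (tokens.length : Int) ≤ p ∨ ∃ t, PySem.List.pyGet? tokens p = some t ∧ (pvUp t = "OR" ∨ pvUp t = ")")
def pvPostOr (tokens : List String) (p : Int) : Prop :=
  (tokens.length : Int) ≤ p ∨ PySem.List.pyGet? tokens p = some ")"

-- ---- small string facts ----

theorem pv_upperChar_paren (c : Char) (h : PySem.Chars.upperChar c = Char.ofNat 41) :
    c = Char.ofNat 41 := by
  unfold PySem.Chars.upperChar PySem.Chars.islower at h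
  split at h
  · rename_i hl
    simp only [Bool.and_eq_true, decide_eq_true_eq, Char.le_def] at hl
    have h97 : (97 : Nat) ≤ c.toNat := hl.1
    have h122 : c.toNat ≤ 122 := hl.2
    have hv : (c.toNat - 32).isValidChar := by left; omega
    have h2 := congrArg Char.toNat h
    rw [Char.toNat_ofNat, Char.toNat_ofNat] at h2
    rw [if_pos hv, if_pos (by decide : (41:Nat).isValidChar)] at h2
    omega
  · exact h

theorem pv_upParen (t : String) (h : pvUp t = ")") : t = ")" := by
  have h2 := congrArg String.toList h
  rw [show pvUp t = PySem.Str.upper t from rfl, PySem.Str.toList_upper] at h2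
  unfold PySem.Chars.upper at h2
  have hp : String.toList ")" = [Char.ofNat 41] := by decide
  rw [hp] at h2
  cases ht : t.toList with
  | nil => rw [ht] at h2; simp at h2
  | cons c rest =>
    rw [ht] at h2
    cases rest with
    | cons d r2 => simp at h2
    | nil =>
      simp only [List.map_cons, List.map_nil, List.cons.injEq, and_true] at h2
      have hc := pv_upperChar_paren c h2
      have h3 : t.toList = [Char.ofNat 41] := by rw [ht, hc]
      have := congrArg String.ofList h3
      simpa using this

theorem pv_str_OR (a b : String) :
    "(" ++ a ++ " " ++ "OR" ++ " " ++ b ++ ")" = "(" ++ a ++ " OR " ++ b ++ ")" := by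
  simp only [String.append_assoc]; rfl

theorem pv_str_AND (a b : String) :
    "(" ++ a ++ " " ++ "AND" ++ " " ++ b ++ ")" = "(" ++ a ++ " AND " ++ b ++ ")" := by
  simp only [String.append_assoc]; rfl

-- ---- facts about pyGet? ----

theorem pv_get_lt (tokens : List String) (p : Int) (t : String)
    (h : PySem.List.pyGet? tokens p = some t) : p < (tokens.length : Int) := by
  by_contra hc
  have : PySem.List.pyGet? tokens p = none := by
    rw [PySem.List.pyGet?_eq_none_iff]
    intro hr
    exact hc hr.2
  rw [this] at h; cases h

-- ---- fold lemmas ----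

theorem pv_fold1_noop (S : List (String × List String)) (O : List String) (h : pvBar1 O) :
    pvFold 1 S O = (S, O) := by
  rcases h with h | ⟨r, h⟩ <;> subst h <;> simp [pvFold]

theorem pv_fold2_noop (S : List (String × List String)) (O : List String) (h : pvBar2 O) :
    pvFold 2 S O = (S, O) := by
  rcases h with h | ⟨r, h⟩
  · rcases h with h | ⟨r, h⟩ <;> subst h <;> simp [pvFold]
  · subst h; simp [pvFold, pvPrec]

theorem pv_wrapNot_shift (k : Nat) (s : String) (ps : List String) :
    pvWrapNot k ("(NOT " ++ s ++ ")", ps) = pvWrapNot (k+1) (s, ps) := by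
  induction k with
  | zero => simp [pvWrapNot]
  | succ m ihm => simp only [pvWrapNot, ihm]

theorem pv_fold2_replicate (k : Nat) (f : String × List String)
    (S : List (String × List String)) (O : List String) :
    pvFold 2 (f :: S) (List.replicate k "NOT" ++ O) = pvFold 2 (pvWrapNot k f :: S) O := by
  induction k generalizing f with
  | zero => simp [pvWrapNot]
  | succ k ih =>
    have hnp : ("NOT" : String) ≠ "(" := by decide
    have : pvFold 2 (f :: S) (List.replicate (k+1) "NOT" ++ O)
        = pvFold 2 (pvApply "NOT" (f :: S)) (List.replicate k "NOT" ++ O) := by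
      simp [List.replicate_succ, pvFold, pvPrec]
    rw [this]
    obtain ⟨s, ps⟩ := f
    have happ : pvApply "NOT" ((s, ps) :: S) = (("(NOT " ++ s ++ ")", ps) :: S) := by
      simp [pvApply]
    rw [happ, ih, pv_wrapNot_shift]

theorem pv_fold1_of_fold2 (S : List (String × List String)) (O : List String) :
    pvFold 1 S O = pvFold 1 (pvFold 2 S O).1 (pvFold 2 S O).2 := by
  induction O generalizing S with
  | nil => simp [pvFold]
  | cons op rest ih =>
    by_cases hp : op = "("
    · subst hp; simp [pvFold]
    · by_cases h2 : 2 ≤ pvPrec op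
      · have h1 : 1 ≤ pvPrec op := by omega
        simp [pvFold, hp, h1, h2, ih]
      · have hop : pvPrec op = 1 := by unfold pvPrec; unfold pvPrec at h2; split_ifs at h2 ⊢ <;> omega
        simp [pvFold, hp, hop]

theorem pv_fold1_idem (S : List (String × List String)) (O : List String) :
    pvFold 1 (pvFold 1 S O).1 (pvFold 1 S O).2 = pvFold 1 S O := by
  induction O generalizing S with
  | nil => simp [pvFold]
  | cons op rest ih =>
    by_cases hp : op = "("
    · subst hp; simp [pvFold]
    · by_cases h1 : 1 ≤ pvPrec op
      · simp [pvFold, hp, h1, ih]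
      · exfalso; unfold pvPrec at h1; split_ifs at h1 <;> omega

theorem pv_fold2_idem (S : List (String × List String)) (O : List String) :
    pvFold 2 (pvFold 2 S O).1 (pvFold 2 S O).2 = pvFold 2 S O := by
  induction O generalizing S with
  | nil => simp [pvFold]
  | cons op rest ih =>
    by_cases hp : op = "("
    · subst hp; simp [pvFold]
    · by_cases h2 : 2 ≤ pvPrec op
      · simp [pvFold, hp, h2, ih]
      · simp [pvFold, hp, h2]

-- ---- single-step unfoldings of pvRunB ----

theorem pv_runB_end (tokens : List String) (p : Int) (e : Bool)
    (S : List (String × List String)) (O : List String) (h : (tokens.length : Int) ≤ p) :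
    pvRunB tokens p e S O = (match e with | true => none | false => pvFinish S O p) := by
  rw [pvRunB.eq_def]
  simp only [dif_neg (by omega : ¬ p < (tokens.length : Int))]

theorem pv_runB_true_not (tokens : List String) (p : Int) (t : String)
    (S : List (String × List String)) (O : List String)
    (hg : PySem.List.pyGet? tokens p = some t) (hn : pvUp t = "NOT") :
    pvRunB tokens p true S O = pvRunB tokens (p+1) true S ("NOT" :: O) := by
  rw [pvRunB.eq_def]
  simp only [dif_pos (pv_get_lt tokens p t hg), hg, hn, if_true, reduceIte]

theorem pv_runB_true_lparen (tokens : List String) (p : Int) (t : String)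
    (S : List (String × List String)) (O : List String)
    (hg : PySem.List.pyGet? tokens p = some t) (hn : pvUp t ≠ "NOT") (hl : t = "(") :
    pvRunB tokens p true S O = pvRunB tokens (p+1) true S ("(" :: O) := by
  rw [pvRunB.eq_def]
  simp only [dif_pos (pv_get_lt tokens p t hg), hg, hl]
  rw [if_neg (by decide : ¬ (pvUp "(" = "NOT"))]
  simp

theorem pv_runB_true_tag (tokens : List String) (p : Int) (t : String)
    (S : List (String × List String)) (O : List String)
    (hg : PySem.List.pyGet? tokens p = some t) (hn : pvUp t ≠ "NOT") (hl : t ≠ "(") (hr : t ≠ ")") :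
    pvRunB tokens p true S O = pvRunB tokens (p+1) false (("has_tag(tags, ?)", [t]) :: S) O := by
  rw [pvRunB.eq_def]
  simp only [dif_pos (pv_get_lt tokens p t hg), hg, hn, hl, hr, if_false, reduceIte]

theorem pv_runB_false_rparen (tokens : List String) (p : Int)
    (S : List (String × List String)) (O : List String)
    (hg : PySem.List.pyGet? tokens p = some ")") :
    pvRunB tokens p false S O =
      (match pvFold 1 S O with
       | (S1, _ :: rest) => pvRunB tokens (p+1) false S1 rest
       | (S1, []) => pvFinish S1 [] p) := by
  rw [pvRunB.eq_def]
  simp only [dif_pos (pv_get_lt tokens p _ hg), hg, if_true, reduceIte]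

theorem pv_runB_false_or (tokens : List String) (p : Int) (t : String)
    (S : List (String × List String)) (O : List String)
    (hg : PySem.List.pyGet? tokens p = some t) (hr : t ≠ ")") (ho : pvUp t = "OR") :
    pvRunB tokens p false S O =
      pvRunB tokens (p+1) true (pvFold 1 S O).1 ("OR" :: (pvFold 1 S O).2) := by
  rw [pvRunB.eq_def]
  simp only [dif_pos (pv_get_lt tokens p t hg), hg, hr, ho, if_false, if_true, reduceIte]

theorem pv_runB_false_and (tokens : List String) (p : Int) (t : String)
    (S : List (String × List String)) (O : List String)
    (hg : PySem.List.pyGet? tokens p = some t) (hr : t ≠ ")") (ho : pvUp t ≠ "OR")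
    (ha : pvUp t = "AND") :
    pvRunB tokens p false S O =
      pvRunB tokens (p+1) true (pvFold 2 S O).1 ("AND" :: (pvFold 2 S O).2) := by
  rw [pvRunB.eq_def]
  simp only [dif_pos (pv_get_lt tokens p t hg), hg, hr, ho, ha, if_false, if_true, reduceIte]
  rw [if_neg (by decide : ¬ (("AND":String) = "OR"))]

theorem pv_runB_false_imp (tokens : List String) (p : Int) (t : String)
    (S : List (String × List String)) (O : List String)
    (hg : PySem.List.pyGet? tokens p = some t) (hr : t ≠ ")") (ho : pvUp t ≠ "OR")
    (ha : pvUp t ≠ "AND") :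
    pvRunB tokens p false S O =
      pvRunB tokens p true (pvFold 2 S O).1 ("AND" :: (pvFold 2 S O).2) := by
  rw [pvRunB.eq_def]
  simp only [dif_pos (pv_get_lt tokens p t hg), hg, hr, ho, ha, if_false, reduceIte]

-- pvFinish only looks at the prec-1 fold of its stacks
theorem pv_finish_fold1 (S : List (String × List String)) (O : List String) (p : Int) :
    pvFinish (pvFold 1 S O).1 (pvFold 1 S O).2 p = pvFinish S O p := by
  unfold pvFinish
  rw [pv_fold1_idem]

-- running on from a prec-2-folded state gives the same answer
theorem pv_runB_false_fold2 (tokens : List String) (p : Int)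
    (S : List (String × List String)) (O : List String) :
    pvRunB tokens p false S O = pvRunB tokens p false (pvFold 2 S O).1 (pvFold 2 S O).2 := by
  by_cases hp : p < (tokens.length : Int)
  · cases hg : PySem.List.pyGet? tokens p with
    | none =>
      rw [pvRunB.eq_def]; simp only [dif_pos hp, hg]
      conv_rhs => rw [pvRunB.eq_def]
      simp only [dif_pos hp, hg]
    | some t =>
      by_cases hr : t = ")"
      · subst hr
        rw [pv_runB_false_rparen tokens p S O hg,
            pv_runB_false_rparen tokens p _ _ hg]
        rw [← pv_fold1_of_fold2]
      · by_cases ho : pvUp t = "OR"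
        · rw [pv_runB_false_or tokens p t S O hg hr ho,
              pv_runB_false_or tokens p t _ _ hg hr ho]
          rw [← pv_fold1_of_fold2]
        · by_cases ha : pvUp t = "AND"
          · rw [pv_runB_false_and tokens p t S O hg hr ho ha,
                pv_runB_false_and tokens p t _ _ hg hr ho ha]
            rw [pv_fold2_idem]
          · rw [pv_runB_false_imp tokens p t S O hg hr ho ha,
                pv_runB_false_imp tokens p t _ _ hg hr ho ha]
            rw [pv_fold2_idem]
  · have hp' : (tokens.length : Int) ≤ p := by omega
    rw [pv_runB_end tokens p false S O hp', pv_runB_end tokens p false _ _ hp']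
    simp only
    unfold pvFinish
    rw [← pv_fold1_of_fold2]

-- when the next token ends an AND/OR chain, a prec-1 pre-fold does not change the run
theorem pv_runB_false_fold1 (tokens : List String) (p : Int)
    (S : List (String × List String)) (O : List String)
    (hpost : (tokens.length : Int) ≤ p ∨
      ∃ t, PySem.List.pyGet? tokens p = some t ∧ (t = ")" ∨ pvUp t = "OR")) :
    pvRunB tokens p false S O = pvRunB tokens p false (pvFold 1 S O).1 (pvFold 1 S O).2 := by
  rcases hpost with hp | ⟨t, hg, ht⟩
  · rw [pv_runB_end tokens p false S O hp, pv_runB_end tokens p false _ _ hp]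
    simp only
    exact (pv_finish_fold1 S O p).symm
  · rcases ht with hr | ho
    · subst hr
      rw [pv_runB_false_rparen tokens p S O hg, pv_runB_false_rparen tokens p _ _ hg]
      rw [pv_fold1_idem]
    · by_cases hr : t = ")"
      · subst hr
        rw [pv_runB_false_rparen tokens p S O hg, pv_runB_false_rparen tokens p _ _ hg]
        rw [pv_fold1_idem]
      · rw [pv_runB_false_or tokens p t S O hg hr ho,
            pv_runB_false_or tokens p t _ _ hg hr ho]
        rw [pv_fold1_idem]


-- ---- stream and scan lemmas ----

theorem pv_stream_nil (tokens : List String) (p : Int) (h : (tokens.length : Int) ≤ p) :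
    pvStream tokens p = [] := by
  unfold pvStream; rw [if_neg (by omega)]

theorem pv_stream_cons (tokens : List String) (p : Int)
    (hge : -(tokens.length : Int) ≤ p) (hlt : p < (tokens.length : Int)) :
    ∃ t, PySem.List.pyGet? tokens p = some t ∧
      pvStream tokens p = t :: pvStream tokens (p + 1) := by
  by_cases h0 : 0 ≤ p
  · have hk : p.toNat < tokens.length := by omega
    refine ⟨tokens[p.toNat], PySem.List.pyGet?_eq_some_getElem tokens h0 hlt, ?_⟩
    unfold pvStream
    rw [if_pos hlt, if_pos h0, List.drop_eq_getElem_cons hk]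
    by_cases h1 : p + 1 < (tokens.length : Int)
    · rw [if_pos h1, if_pos (by omega : (0:Int) ≤ p + 1)]
      have : (p + 1).toNat = p.toNat + 1 := by omega
      rw [this]
    · rw [if_neg h1]
      have : tokens.drop (p.toNat + 1) = [] := by
        rw [List.drop_eq_nil_iff]; omega
      rw [this]
  · have hneg : p < 0 := by omega
    have hk : (p + tokens.length).toNat < tokens.length := by omega
    have hget : PySem.List.pyGet? tokens p = some tokens[(p + tokens.length).toNat] := by
      unfold PySem.List.pyGet? PySem.List.pyIdx?
      rw [if_neg (by omega), if_pos (by omega : -(tokens.length:Int) ≤ p)]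
      have : tokens.length - (-p).toNat = (p + tokens.length).toNat := by omega
      rw [this]
      simp [List.getElem?_eq_getElem hk]
    refine ⟨tokens[(p + tokens.length).toNat], hget, ?_⟩
    unfold pvStream
    rw [if_pos hlt, if_neg h0, List.drop_eq_getElem_cons hk]
    by_cases h1 : 0 ≤ p + 1
    · -- p = -1 : the next stream is the whole list
      have hp1 : p = -1 := by omega
      rw [if_pos (by omega : p + 1 < (tokens.length:Int)), if_pos h1]
      have h2 : (p + tokens.length).toNat + 1 = tokens.length := by omega
      have h3 : tokens.drop ((p + tokens.length).toNat + 1) = [] := by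
        rw [List.drop_eq_nil_iff]; omega
      have h4 : (p + 1).toNat = 0 := by omega
      rw [h3, h4, List.drop_zero]
      simp
    · rw [if_pos (by omega : p + 1 < (tokens.length:Int)), if_neg h1]
      have : (p + 1 + tokens.length).toNat = (p + tokens.length).toNat + 1 := by omega
      rw [this, List.cons_append]

theorem pv_scanL_generic (t : String) (rest : List String) (d : Nat)
    (hr : t ≠ ")") (ho : pvUp t ≠ "OR") (ha : pvUp t ≠ "AND") :
    pvScanL (t :: rest) false d = pvScanL (t :: rest) true d := by
  have hoa : ¬ (pvUp t = "OR" ∨ pvUp t = "AND") := by tauto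
  by_cases hn : pvUp t = "NOT"
  · simp [pvScanL, hr, hoa, hn]
  · by_cases hl : t = "("
    · subst hl
      simp [pvScanL, show ¬((")":String) = "(") from by decide,
        show ¬ pvUp "(" = "OR" from by decide, show ¬ pvUp "(" = "AND" from by decide,
        show ¬ pvUp "(" = "NOT" from by decide]
    · simp [pvScanL, hr, hoa, hn, hl]


-- ---- completeness: the DFA accepting implies A's parser returns (with enough fuel) ----

theorem pv_comp (tokens : List String) : ∀ fuel : Nat,
    (∀ p d, -(tokens.length : Int) ≤ p → pvScanL (pvStream tokens p) true d = true →
      (∀ t, PySem.List.pyGet? tokens p = some t → pvUp t ≠ "NOT") →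
      4 * ((tokens.length : Int) - p).toNat + 1 ≤ fuel →
      ∃ s ps p', pvGoPrim tokens fuel p = some (s, ps, p') ∧ p < p' ∧ p' ≤ (tokens.length : Int) ∧
        pvScanL (pvStream tokens p') false d = true) ∧
    (∀ p d, -(tokens.length : Int) ≤ p → pvScanL (pvStream tokens p) true d = true →
      4 * ((tokens.length : Int) - p).toNat + 2 ≤ fuel →
      ∃ s ps p', pvGoNot tokens fuel p = some (s, ps, p') ∧ p < p' ∧ p' ≤ (tokens.length : Int) ∧
        pvScanL (pvStream tokens p') false d = true) ∧
    (∀ p d, -(tokens.length : Int) ≤ p → pvScanL (pvStream tokens p) true d = true →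
      4 * ((tokens.length : Int) - p).toNat + 3 ≤ fuel →
      ∃ s ps p', pvGoAnd tokens fuel p = some (s, ps, p') ∧ p < p' ∧ p' ≤ (tokens.length : Int) ∧
        pvScanL (pvStream tokens p') false d = true ∧ pvPostAnd tokens p') ∧
    (∀ p d s0 ps0, -(tokens.length : Int) ≤ p → p ≤ (tokens.length : Int) →
      pvScanL (pvStream tokens p) false d = true →
      4 * ((tokens.length : Int) - p).toNat + 6 ≤ fuel →
      ∃ s ps p', pvGoAndLoop tokens fuel s0 ps0 p = some (s, ps, p') ∧ p ≤ p' ∧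
        p' ≤ (tokens.length : Int) ∧
        pvScanL (pvStream tokens p') false d = true ∧ pvPostAnd tokens p') ∧
    (∀ p d, -(tokens.length : Int) ≤ p → pvScanL (pvStream tokens p) true d = true →
      4 * ((tokens.length : Int) - p).toNat + 4 ≤ fuel →
      ∃ s ps p', pvGoOr tokens fuel p = some (s, ps, p') ∧ p < p' ∧ p' ≤ (tokens.length : Int) ∧
        pvScanL (pvStream tokens p') false d = true ∧ pvPostOr tokens p') ∧
    (∀ p d s0 ps0, -(tokens.length : Int) ≤ p → p ≤ (tokens.length : Int) →
      pvScanL (pvStream tokens p) false d = true →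
      pvPostAnd tokens p →
      4 * ((tokens.length : Int) - p).toNat + 6 ≤ fuel →
      ∃ s ps p', pvGoOrLoop tokens fuel s0 ps0 p = some (s, ps, p') ∧ p ≤ p' ∧
        p' ≤ (tokens.length : Int) ∧
        pvScanL (pvStream tokens p') false d = true ∧ pvPostOr tokens p') := by
  intro fuel
  induction fuel with
  | zero =>
    refine ⟨?_, ?_, ?_, ?_, ?_, ?_⟩
    · intro p d _ _ _ hf; omega
    · intro p d _ _ hf; omega
    · intro p d _ _ hf; omega
    · intro p d s0 ps0 _ _ _ hf; omega
    · intro p d _ _ hf; omega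
    · intro p d s0 ps0 _ _ _ _ hf; omega
  | succ fuel ih =>
    obtain ⟨ihP, ihN, ihA, ihAL, ihO, ihOL⟩ := ih
    have hUpPar : pvUp ")" = ")" := by decide
    refine ⟨?_, ?_, ?_, ?_, ?_, ?_⟩
    -- goPrim
    · intro p d hge hscan hnot hf
      by_cases hp : p < (tokens.length : Int)
      · obtain ⟨t, hg, hstream⟩ := pv_stream_cons tokens p hge hp
        rw [hstream] at hscan
        have hn : pvUp t ≠ "NOT" := hnot t hg
        by_cases hl : t = "("
        · -- parenthesised subexpression
          subst hl
          rw [show pvScanL ("(" :: pvStream tokens (p+1)) true d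
              = pvScanL (pvStream tokens (p+1)) true (d+1) from by
            simp [pvScanL, show ¬ pvUp "(" = "NOT" from by decide]] at hscan
          obtain ⟨s, ps, p1, hOr, hlt1, hlen1, hscan1, hpost1⟩ :=
            ihO (p+1) (d+1) (by omega) hscan (by omega)
          rcases hpost1 with hend | hg1
          · rw [pv_stream_nil tokens p1 hend] at hscan1
            simp [pvScanL] at hscan1
          · have hp1 : p1 < (tokens.length : Int) := pv_get_lt tokens p1 _ hg1
            obtain ⟨t1, hg1', hstream1⟩ := pv_stream_cons tokens p1 (by omega) hp1
            have ht1 : t1 = ")" := by rw [hg1] at hg1'; exact (Option.some.inj hg1').symm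
            subst ht1
            rw [hstream1] at hscan1
            rw [show pvScanL (")" :: pvStream tokens (p1+1)) false (d+1)
                = pvScanL (pvStream tokens (p1+1)) false d from by
              simp [pvScanL]] at hscan1
            refine ⟨s, ps, p1 + 1, ?_, by omega, by omega, hscan1⟩
            have hc1 : ¬ p ≥ (tokens.length : Int) := by omega
            have hc2 : ¬ p1 ≥ (tokens.length : Int) := by omega
            simp only [pvGoPrim, hc1, hg, hOr, hc2, hg1, if_false, reduceIte]
        · by_cases hr : t = ")"
          · subst hr
            simp [pvScanL, show ¬ pvUp ")" = "NOT" from by decide] at hscan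
          · -- plain tag token
            refine ⟨"has_tag(tags, ?)", [t], p + 1, ?_, by omega, by omega, ?_⟩
            · have hc1 : ¬ p ≥ (tokens.length : Int) := by omega
              simp only [pvGoPrim, hc1, hg, hl, hr, if_false, reduceIte]
            · rw [show pvScanL (t :: pvStream tokens (p+1)) true d
                  = pvScanL (pvStream tokens (p+1)) false d from by
                simp [pvScanL, hn, hl, hr]] at hscan
              exact hscan
      · rw [pv_stream_nil tokens p (by omega)] at hscan
        simp [pvScanL] at hscan
    -- goNot
    · intro p d hge hscan hf
      by_cases hp : p < (tokens.length : Int)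
      · obtain ⟨t, hg, hstream⟩ := pv_stream_cons tokens p hge hp
        by_cases hn : pvUp t = "NOT"
        · rw [hstream, show pvScanL (t :: pvStream tokens (p+1)) true d
              = pvScanL (pvStream tokens (p+1)) true d from by simp [pvScanL, hn]] at hscan
          obtain ⟨s, ps, p1, hNot, hlt1, hlen1, hscan1⟩ := ihN (p+1) d (by omega) hscan (by omega)
          refine ⟨"(NOT " ++ s ++ ")", ps, p1, ?_, by omega, hlen1, hscan1⟩
          simp only [pvGoNot, hp, hg, hn, hNot, if_true, reduceIte]
        · obtain ⟨s, ps, p1, hPrim, hlt1, hlen1, hscan1⟩ :=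
            ihP p d hge hscan
              (fun t' hg' => by rw [hg] at hg'; injection hg' with h; rw [← h]; exact hn)
              (by omega)
          refine ⟨s, ps, p1, ?_, hlt1, hlen1, hscan1⟩
          simp only [pvGoNot, hp, hg, hn, if_false, reduceIte, hPrim]
      · rw [pv_stream_nil tokens p (by omega)] at hscan
        simp [pvScanL] at hscan
    -- goAnd
    · intro p d hge hscan hf
      obtain ⟨s, ps, p1, hNot, hlt1, hlen1, hscan1⟩ := ihN p d hge hscan (by omega)
      obtain ⟨s', ps', p', hLoop, hle, hlen', hscan', hpost⟩ :=
        ihAL p1 d s ps (by omega) hlen1 hscan1 (by omega)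
      refine ⟨s', ps', p', ?_, by omega, hlen', hscan', hpost⟩
      simp only [pvGoAnd, hNot, hLoop]
    -- goAndLoop
    · intro p d s0 ps0 hge hplen hscan hf
      by_cases hp : p < (tokens.length : Int)
      · obtain ⟨t, hg, hstream⟩ := pv_stream_cons tokens p hge hp
        by_cases ha : pvUp t = "AND"
        · have hr : t ≠ ")" := fun h => by subst h; rw [hUpPar] at ha; exact absurd ha (by decide)
          rw [hstream, show pvScanL (t :: pvStream tokens (p+1)) false d
              = pvScanL (pvStream tokens (p+1)) true d from by
            simp [pvScanL, hr, ha]] at hscan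
          obtain ⟨rs, rps, p2, hNot, hlt2, hlen2, hscan2⟩ := ihN (p+1) d (by omega) hscan (by omega)
          obtain ⟨s', ps', p', hLoop, hle, hlen', hscan', hpost⟩ :=
            ihAL p2 d ("(" ++ s0 ++ " AND " ++ rs ++ ")") (ps0 ++ rps) (by omega) hlen2 hscan2 (by omega)
          refine ⟨s', ps', p', ?_, by omega, hlen', hscan', hpost⟩
          simp only [pvGoAndLoop, hp, hg, ha, hNot, hLoop, if_true, reduceIte]
        · by_cases ho : pvUp t = "OR" ∨ pvUp t = ")"
          · refine ⟨s0, ps0, p, ?_, le_refl p, hplen, hscan, Or.inr ⟨t, hg, ho⟩⟩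
            simp only [pvGoAndLoop, hp, hg, ha, if_false, if_true, reduceIte]
            rw [if_pos ho]
          · push_neg at ho
            have hr : t ≠ ")" := fun h => by subst h; exact ho.2 hUpPar
            rw [hstream, pv_scanL_generic t _ d hr ho.1 ha, ← hstream] at hscan
            obtain ⟨rs, rps, p2, hNot, hlt2, hlen2, hscan2⟩ := ihN p d hge hscan (by omega)
            obtain ⟨s', ps', p', hLoop, hle, hlen', hscan', hpost⟩ :=
              ihAL p2 d ("(" ++ s0 ++ " AND " ++ rs ++ ")") (ps0 ++ rps) (by omega) hlen2 hscan2 (by omega)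
            refine ⟨s', ps', p', ?_, by omega, hlen', hscan', hpost⟩
            simp only [pvGoAndLoop, hp, hg, ha, if_false, if_true, reduceIte]
            rw [if_neg (by tauto : ¬ (pvUp t = "OR" ∨ pvUp t = ")"))]
            simp only [hNot, hLoop]
      · refine ⟨s0, ps0, p, ?_, le_refl p, hplen, hscan, Or.inl (by omega)⟩
        simp only [pvGoAndLoop, hp, if_false, reduceIte]
    -- goOr
    · intro p d hge hscan hf
      obtain ⟨s, ps, p1, hAnd, hlt1, hlen1, hscan1, hpost1⟩ := ihA p d hge hscan (by omega)
      obtain ⟨s', ps', p', hLoop, hle, hlen', hscan', hpost⟩ :=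
        ihOL p1 d s ps (by omega) hlen1 hscan1 hpost1 (by omega)
      refine ⟨s', ps', p', ?_, by omega, hlen', hscan', hpost⟩
      simp only [pvGoOr, hAnd, hLoop]
    -- goOrLoop
    · intro p d s0 ps0 hge hplen hscan hpost hf
      unfold pvPostAnd at hpost
      rcases hpost with hend | ⟨t, hg, ht⟩
      · refine ⟨s0, ps0, p, ?_, le_refl p, hplen, hscan, Or.inl hend⟩
        have hnp : ¬ p < (tokens.length : Int) := by omega
        simp only [pvGoOrLoop, hnp, if_false, reduceIte]
      · have hp : p < (tokens.length : Int) := pv_get_lt tokens p t hg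
        obtain ⟨t', hg', hstream⟩ := pv_stream_cons tokens p hge hp
        have htt : t' = t := by rw [hg] at hg'; exact (Option.some.inj hg').symm
        rw [htt] at hstream
        rcases ht with ho | hrp
        · have hr : t ≠ ")" := fun h => by subst h; rw [hUpPar] at ho; exact absurd ho (by decide)
          rw [hstream, show pvScanL (t :: pvStream tokens (p+1)) false d
              = pvScanL (pvStream tokens (p+1)) true d from by
            simp [pvScanL, hr, ho]] at hscan
          obtain ⟨rs, rps, p2, hAnd, hlt2, hlen2, hscan2, hpost2⟩ :=
            ihA (p+1) d (by omega) hscan (by omega)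
          obtain ⟨s', ps', p', hLoop, hle, hlen', hscan', hpost'⟩ :=
            ihOL p2 d ("(" ++ s0 ++ " OR " ++ rs ++ ")") (ps0 ++ rps) (by omega) hlen2 hscan2 hpost2 (by omega)
          refine ⟨s', ps', p', ?_, by omega, hlen', hscan', hpost'⟩
          simp only [pvGoOrLoop, hp, hg, ho, hAnd, hLoop, if_true, reduceIte]
        · have hr : t = ")" := pv_upParen t hrp
          subst hr
          refine ⟨s0, ps0, p, ?_, le_refl p, hplen, hscan, Or.inr hg⟩
          simp only [pvGoOrLoop, hp, hg, if_true, reduceIte]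
          rw [if_neg (show ¬ pvUp ")" = "OR" from by decide)]


-- ---- goPrim is none past the end (any fuel) ----
theorem pv_goPrim_end (tokens : List String) (p : Int) (h : p ≥ (tokens.length : Int)) :
    ∀ fuel, pvGoPrim tokens fuel p = none := by
  intro fuel
  cases fuel with
  | zero => simp [pvGoPrim]
  | succ f => simp only [pvGoPrim]; rw [if_pos h]

-- ---- simulation: every successful step of A's parser is mirrored by B's scan ----

theorem pv_sim (tokens : List String) : ∀ fuel : Nat,
    (∀ p s ps p', pvGoPrim tokens fuel p = some (s, ps, p') →
      (∀ t, PySem.List.pyGet? tokens p = some t → pvUp t ≠ "NOT") →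
      ∀ S O, pvRunB tokens p true S O = pvRunB tokens p' false ((s, ps) :: S) O) ∧
    (∀ p s ps p', pvGoNot tokens fuel p = some (s, ps, p') →
      ∀ S O, ∃ k raw, pvWrapNot k raw = (s, ps) ∧
        pvRunB tokens p true S O
          = pvRunB tokens p' false (raw :: S) (List.replicate k "NOT" ++ O)) ∧
    (∀ p s ps p', pvGoAnd tokens fuel p = some (s, ps, p') → ∀ S O, pvBar2 O →
      pvRunB tokens p true S O = pvRunB tokens p' false ((s, ps) :: S) O ∧
        pvPostAnd tokens p') ∧
    (∀ p s0 ps0 s ps p', pvGoAndLoop tokens fuel s0 ps0 p = some (s, ps, p') →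
      ∀ S O, pvBar2 O →
      pvRunB tokens p false ((s0, ps0) :: S) O = pvRunB tokens p' false ((s, ps) :: S) O ∧
        pvPostAnd tokens p') ∧
    (∀ p s ps p', pvGoOr tokens fuel p = some (s, ps, p') → ∀ S O, pvBar1 O →
      pvRunB tokens p true S O = pvRunB tokens p' false ((s, ps) :: S) O ∧
        pvPostOr tokens p') ∧
    (∀ p s0 ps0 s ps p', pvGoOrLoop tokens fuel s0 ps0 p = some (s, ps, p') →
      ∀ S O, pvBar1 O → pvPostAnd tokens p →
      pvRunB tokens p false ((s0, ps0) :: S) O = pvRunB tokens p' false ((s, ps) :: S) O ∧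
        pvPostOr tokens p') := by
  intro fuel
  induction fuel with
  | zero =>
    refine ⟨?_, ?_, ?_, ?_, ?_, ?_⟩
    · intro p s ps p' h; simp [pvGoPrim] at h
    · intro p s ps p' h; simp [pvGoNot] at h
    · intro p s ps p' h; simp [pvGoAnd] at h
    · intro p s0 ps0 s ps p' h; simp [pvGoAndLoop] at h
    · intro p s ps p' h; simp [pvGoOr] at h
    · intro p s0 ps0 s ps p' h; simp [pvGoOrLoop] at h
  | succ fuel ih =>
    obtain ⟨ihP, ihN, ihA, ihAL, ihO, ihOL⟩ := ih
    have hUpPar : pvUp ")" = ")" := by decide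
    refine ⟨?_, ?_, ?_, ?_, ?_, ?_⟩
    -- goPrim
    · intro p s ps p' h hnot S O
      simp only [pvGoPrim] at h
      by_cases hp : p ≥ (tokens.length : Int)
      · rw [if_pos hp] at h; cases h
      · rw [if_neg hp] at h
        cases hg : PySem.List.pyGet? tokens p with
        | none => rw [hg] at h; cases h
        | some tok =>
          simp only [hg] at h
          by_cases hl : tok = "("
          · rw [if_pos hl] at h
            cases hOr : pvGoOr tokens fuel (p+1) with
            | none => rw [hOr] at h; cases h
            | some r =>
              obtain ⟨s1, ps1, p1⟩ := r
              rw [hOr] at h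
              simp only at h
              by_cases hp1 : p1 ≥ (tokens.length : Int)
              · rw [if_pos hp1] at h; cases h
              · rw [if_neg hp1] at h
                cases hg1 : PySem.List.pyGet? tokens p1 with
                | none => rw [hg1] at h; cases h
                | some t1 =>
                  simp only [hg1] at h
                  by_cases ht1 : t1 = ")"
                  · rw [if_pos ht1] at h
                    simp only [Option.some.injEq, Prod.mk.injEq] at h
                    obtain ⟨rfl, rfl, rfl⟩ := h
                    subst hl; subst ht1
                    rw [pv_runB_true_lparen tokens p "(" S O hg (hnot "(" hg) rfl]
                    have hOrSim := (ihO (p+1) s1 ps1 p1 hOr S ("(" :: O) (Or.inr ⟨O, rfl⟩)).1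
                    rw [hOrSim]
                    rw [pv_runB_false_rparen tokens p1 ((s1, ps1) :: S) ("(" :: O) hg1]
                    have hfold : pvFold 1 ((s1, ps1) :: S) ("(" :: O) = ((s1, ps1) :: S, "(" :: O) := by
                      simp [pvFold]
                    rw [hfold]
                  · rw [if_neg ht1] at h; cases h
          · rw [if_neg hl] at h
            by_cases hr : tok = ")"
            · rw [if_pos hr] at h; cases h
            · rw [if_neg hr] at h
              simp only [Option.some.injEq, Prod.mk.injEq] at h
              obtain ⟨rfl, rfl, rfl⟩ := h
              rw [pv_runB_true_tag tokens p tok S O hg (hnot tok hg) hl hr]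
    -- goNot
    · intro p s ps p' h S O
      simp only [pvGoNot] at h
      by_cases hp : p < (tokens.length : Int)
      · rw [if_pos hp] at h
        cases hg : PySem.List.pyGet? tokens p with
        | none => rw [hg] at h; cases h
        | some t =>
          simp only [hg] at h
          by_cases hn : pvUp t = "NOT"
          · rw [if_pos hn] at h
            cases hNot : pvGoNot tokens fuel (p+1) with
            | none => rw [hNot] at h; cases h
            | some r =>
              obtain ⟨s1, ps1, p1⟩ := r
              rw [hNot] at h
              simp only [Option.some.injEq, Prod.mk.injEq] at h
              obtain ⟨rfl, rfl, rfl⟩ := h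
              obtain ⟨k, raw, hwrap, heq⟩ := ihN (p+1) s1 ps1 p1 hNot S ("NOT" :: O)
              refine ⟨k + 1, raw, ?_, ?_⟩
              · simp only [pvWrapNot, hwrap]
              · rw [pv_runB_true_not tokens p t S O hg hn, heq]
                have : List.replicate k "NOT" ++ ("NOT" :: O)
                    = List.replicate (k+1) "NOT" ++ O := by
                  simp [List.replicate_succ', List.append_assoc]
                rw [this]
          · rw [if_neg hn] at h
            refine ⟨0, (s, ps), rfl, ?_⟩
            simp only [List.replicate, List.nil_append]
            exact ihP p s ps p' h
              (fun t' hg' => by rw [hg] at hg'; injection hg' with h2; rw [← h2]; exact hn) S O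
      · rw [if_neg hp] at h
        rw [pv_goPrim_end tokens p (by omega) fuel] at h; cases h
    -- goAnd
    · intro p s ps p' h S O hbar
      simp only [pvGoAnd] at h
      cases hNot : pvGoNot tokens fuel p with
      | none => rw [hNot] at h; cases h
      | some r =>
        obtain ⟨s1, ps1, p1⟩ := r
        rw [hNot] at h
        simp only at h
        obtain ⟨k, raw, hwrap, heq⟩ := ihN p s1 ps1 p1 hNot S O
        obtain ⟨hloop, hpost⟩ := ihAL p1 s1 ps1 s ps p' h S O hbar
        refine ⟨?_, hpost⟩
        rw [heq, pv_runB_false_fold2 tokens p1 (raw :: S) (List.replicate k "NOT" ++ O),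
          pv_fold2_replicate, hwrap, pv_fold2_noop _ _ hbar]
        exact hloop
    -- goAndLoop
    · intro p s0 ps0 s ps p' h S O hbar
      simp only [pvGoAndLoop] at h
      by_cases hp : p < (tokens.length : Int)
      · rw [if_pos hp] at h
        cases hg : PySem.List.pyGet? tokens p with
        | none => rw [hg] at h; cases h
        | some t =>
          simp only [hg] at h
          by_cases ha : pvUp t = "AND"
          · rw [if_pos ha] at h
            cases hNot : pvGoNot tokens fuel (p+1) with
            | none => rw [hNot] at h; cases h
            | some r =>
              obtain ⟨rs, rps, p2⟩ := r
              rw [hNot] at h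
              simp only at h
              have hr : t ≠ ")" := fun hh => by subst hh; rw [hUpPar] at ha; exact absurd ha (by decide)
              have ho : ¬ pvUp t = "OR" := by rw [ha]; decide
              rw [pv_runB_false_and tokens p t ((s0, ps0) :: S) O hg hr ho ha,
                pv_fold2_noop _ _ hbar]
              obtain ⟨k, raw, hwrap, heq⟩ := ihN (p+1) rs rps p2 hNot ((s0, ps0) :: S) ("AND" :: O)
              rw [heq, pv_runB_false_fold2 tokens p2 _ _, pv_fold2_replicate, hwrap]
              have hfold : pvFold 2 ((rs, rps) :: (s0, ps0) :: S) ("AND" :: O)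
                  = (("(" ++ s0 ++ " AND " ++ rs ++ ")", ps0 ++ rps) :: S, O) := by
                simp [pvFold, pvPrec, pvApply, pv_fold2_noop _ _ hbar, pv_str_AND]
              rw [hfold]
              exact ihAL p2 _ _ s ps p' h S O hbar
          · rw [if_neg ha] at h
            by_cases ho : pvUp t = "OR" ∨ pvUp t = ")"
            · rw [if_pos ho] at h
              simp only [Option.some.injEq, Prod.mk.injEq] at h
              obtain ⟨rfl, rfl, rfl⟩ := h
              exact ⟨rfl, Or.inr ⟨t, hg, ho⟩⟩
            · rw [if_neg ho] at h
              cases hNot : pvGoNot tokens fuel p with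
              | none => rw [hNot] at h; cases h
              | some r =>
                obtain ⟨rs, rps, p2⟩ := r
                rw [hNot] at h
                simp only at h
                have ho1 : ¬ pvUp t = "OR" := fun hh => ho (Or.inl hh)
                have ho2 : ¬ pvUp t = ")" := fun hh => ho (Or.inr hh)
                have hr : t ≠ ")" := fun hh => by subst hh; exact ho2 hUpPar
                rw [pv_runB_false_imp tokens p t ((s0, ps0) :: S) O hg hr ho1 ha,
                  pv_fold2_noop _ _ hbar]
                obtain ⟨k, raw, hwrap, heq⟩ := ihN p rs rps p2 hNot ((s0, ps0) :: S) ("AND" :: O)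
                rw [heq, pv_runB_false_fold2 tokens p2 _ _, pv_fold2_replicate, hwrap]
                have hfold : pvFold 2 ((rs, rps) :: (s0, ps0) :: S) ("AND" :: O)
                    = (("(" ++ s0 ++ " AND " ++ rs ++ ")", ps0 ++ rps) :: S, O) := by
                  simp [pvFold, pvPrec, pvApply, pv_fold2_noop _ _ hbar, pv_str_AND]
                rw [hfold]
                exact ihAL p2 _ _ s ps p' h S O hbar
      · rw [if_neg hp] at h
        simp only [Option.some.injEq, Prod.mk.injEq] at h
        obtain ⟨rfl, rfl, rfl⟩ := h
        exact ⟨rfl, Or.inl (by omega)⟩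
    -- goOr
    · intro p s ps p' h S O hbar
      simp only [pvGoOr] at h
      cases hAnd : pvGoAnd tokens fuel p with
      | none => rw [hAnd] at h; cases h
      | some r =>
        obtain ⟨s1, ps1, p1⟩ := r
        rw [hAnd] at h
        simp only at h
        obtain ⟨hstep, hpost1⟩ := ihA p s1 ps1 p1 hAnd S O (Or.inl hbar)
        obtain ⟨hloop, hpost⟩ := ihOL p1 s1 ps1 s ps p' h S O hbar hpost1
        exact ⟨hstep.trans hloop, hpost⟩
    -- goOrLoop
    · intro p s0 ps0 s ps p' h S O hbar hpost
      simp only [pvGoOrLoop] at h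
      by_cases hp : p < (tokens.length : Int)
      · rw [if_pos hp] at h
        cases hg : PySem.List.pyGet? tokens p with
        | none => rw [hg] at h; cases h
        | some t =>
          simp only [hg] at h
          by_cases ho : pvUp t = "OR"
          · rw [if_pos ho] at h
            cases hAnd : pvGoAnd tokens fuel (p+1) with
            | none => rw [hAnd] at h; cases h
            | some r =>
              obtain ⟨rs, rps, p2⟩ := r
              rw [hAnd] at h
              simp only at h
              have hr : t ≠ ")" := fun hh => by subst hh; rw [hUpPar] at ho; exact absurd ho (by decide)
              rw [pv_runB_false_or tokens p t ((s0, ps0) :: S) O hg hr ho,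
                pv_fold1_noop _ _ hbar]
              obtain ⟨hstep, hpost2⟩ := ihA (p+1) rs rps p2 hAnd ((s0, ps0) :: S) ("OR" :: O)
                (Or.inr ⟨O, rfl⟩)
              rw [hstep]
              have hcond : (tokens.length : Int) ≤ p2 ∨
                  ∃ t2, PySem.List.pyGet? tokens p2 = some t2 ∧ (t2 = ")" ∨ pvUp t2 = "OR") := by
                rcases hpost2 with hend | ⟨t2, hg2, ht2⟩
                · exact Or.inl hend
                · refine Or.inr ⟨t2, hg2, ?_⟩
                  rcases ht2 with h1 | h2
                  · exact Or.inr h1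
                  · exact Or.inl (pv_upParen t2 h2)
              rw [pv_runB_false_fold1 tokens p2 _ _ hcond]
              have hfold : pvFold 1 ((rs, rps) :: (s0, ps0) :: S) ("OR" :: O)
                  = (("(" ++ s0 ++ " OR " ++ rs ++ ")", ps0 ++ rps) :: S, O) := by
                simp [pvFold, pvPrec, pvApply, pv_fold1_noop _ _ hbar, pv_str_OR]
              rw [hfold]
              exact ihOL p2 _ _ s ps p' h S O hbar hpost2
          · rw [if_neg ho] at h
            simp only [Option.some.injEq, Prod.mk.injEq] at h
            obtain ⟨rfl, rfl, rfl⟩ := h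
            refine ⟨rfl, ?_⟩
            rcases hpost with hend | ⟨t2, hg2, ht2⟩
            · exact Or.inl hend
            · have htt : t2 = t := by rw [hg] at hg2; exact (Option.some.inj hg2).symm
              subst htt
              rcases ht2 with h1 | h2
              · exact absurd h1 ho
              · exact Or.inr (by rw [pv_upParen t2 h2] at hg; exact hg)
      · rw [if_neg hp] at h
        simp only [Option.some.injEq, Prod.mk.injEq] at h
        obtain ⟨rfl, rfl, rfl⟩ := h
        exact ⟨rfl, Or.inl (by omega)⟩

-- ===== VERDICT (by name: the statement is the Claim_ definition above) =====
theorem parse_tag_expression_spec : Claim_equal_parse_tag_expression := by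
  intro tokens pos hdom hpre
  unfold Spec_parse_tag_expression
  obtain ⟨hge, hscan⟩ := hpre
  obtain ⟨s, ps, p', hOr, hlt, hlen, hscan', hpost⟩ :=
    (pv_comp tokens (4 * (((tokens.length : Int) - pos).toNat + 2))).2.2.2.2.1
      pos 0 hge hscan (by omega)
  unfold parse_tag_expression parse_tag_expression_alt
  rw [hOr]
  have hsim := (pv_sim tokens (4 * (((tokens.length : Int) - pos).toNat + 2))).2.2.2.2.1
    pos s ps p' hOr [] [] (Or.inl rfl)
  rw [hsim.1]
  rcases hsim.2 with hend | hg'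
  · rw [pv_runB_end tokens p' false [(s, ps)] [] hend]
    simp [pvFinish, pvFold]
  · rw [pv_runB_false_rparen tokens p' [(s, ps)] [] hg']
    simp [pvFold, pvFinish]
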